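-- pv_equiv track=rewrite | github.com/bysse/advent-of-code | 2025/python/day06/day06.py | digit_transpose
-- ===== SOURCE A (Python) =====
-- def isblank(n):
--     for c in n:
--         if c != ' ':
--             return False
--     return True
--
-- def digit_transpose(lines):
--     max_len = max(len(line) for line in lines)
--     t = []
--     for i in range(max_len):
--         n = ''
--         for line in lines:
--             index = len(line) - i - 1
--             if index >= 0:
--                 n += line[index]
--         if not isblank(n):
--             t.append(int(n))
--     return t
-- ===== SOURCE B (Python) =====
-- def digit_transpose(lines):
--     max_len = max(len(line) for line in lines)
--     cols = [''] * max_len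
--     for line in lines:
--         r = line[::-1]
--         cols = [col + r[j] if j < len(r) else col for j, col in enumerate(cols)]
--     result = []
--     for col in cols:
--         if any(ch != ' ' for ch in col):
--             result.append(int(col))
--     return result
-- ===== Notes on version B (the rewrite author's own statement) =====
-- stated objective: alternative
-- what changed: A builds each column string with a column-outer/line-inner nested scan with a negative-index guard; B makes one row-major pass that distributes each line's reversed characters into a table of per-column buckets, then a separate linear scan over the built table parses the columns.
import Mathlib
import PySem

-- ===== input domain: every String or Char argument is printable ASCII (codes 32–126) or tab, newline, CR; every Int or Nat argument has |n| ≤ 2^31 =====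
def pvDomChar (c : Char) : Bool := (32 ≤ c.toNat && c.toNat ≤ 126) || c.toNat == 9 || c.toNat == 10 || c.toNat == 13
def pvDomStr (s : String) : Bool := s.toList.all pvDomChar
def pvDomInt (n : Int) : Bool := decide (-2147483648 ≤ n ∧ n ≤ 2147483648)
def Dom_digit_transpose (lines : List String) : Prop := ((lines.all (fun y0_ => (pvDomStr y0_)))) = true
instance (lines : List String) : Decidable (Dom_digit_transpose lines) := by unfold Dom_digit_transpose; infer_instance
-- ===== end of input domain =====

-- B replaces A's column-outer/line-inner nested scan by one row-major pass filling a table of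
-- per-column buckets followed by a scan of that table (alternative decomposition, same cost).

-- ===== PORT A =====
def pvMaxLen (lines : List String) : Nat :=
  (lines.map (fun l => l.toList.length)).foldl Nat.max 0

def pvIsblank : List Char → Bool
  | [] => true
  | c :: rest => if c ≠ ' ' then false else pvIsblank rest

def pvAStep (i : Nat) (n : List Char) (line : String) : List Char :=
  let index : Int := (line.toList.length : Int) - (i : Int) - 1
  if 0 ≤ index then n ++ ((PySem.List.pyGet? line.toList index).elim [] fun c => [c]) else n

def digit_transpose (lines : List String) : List Int :=
  let max_len := pvMaxLen lines
  (List.range max_len).foldl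
    (fun t i =>
      let n := lines.foldl (pvAStep i) []
      if !pvIsblank n then t ++ [(PySem.Int.ofStr? (String.mk n)).getD 0] else t) []

-- ===== PORT B =====
-- one line's contribution: distribute its reversed characters into the column buckets
def pvBStep (cols : List (List Char)) (line : String) : List (List Char) :=
  let r := line.toList.reverse
  (PySem.List.enumerate cols).map
    (fun jc => if jc.1 < (r.length : Int) then jc.2 ++ [r.getD jc.1.toNat ' '] else jc.2)

def digit_transpose_alt (lines : List String) : List Int :=
  let max_len := pvMaxLen lines
  let cols := lines.foldl pvBStep (List.replicate max_len ([] : List Char))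
  cols.foldl
    (fun result col =>
      if col.any (fun ch => ch ≠ ' ') then result ++ [(PySem.Int.ofStr? (String.mk col)).getD 0]
      else result) []

-- ===== PRECONDITION & SPEC =====
-- one reversed-column character of a line (empty if the line is too short)
def pvCell (line : List Char) (i : Nat) : List Char := (line.reverse[i]?).elim [] (fun c => [c])
-- the column string A builds for column i (counted from the right)
def pvCol (lines : List String) (i : Nat) : List Char :=
  lines.flatMap (fun line => pvCell line.toList i)

-- Pre_ excludes exactly the inputs on which Python A raises: the empty list (max() of an empty
-- sequence → ValueError) and inputs with a non-blank column string that int() rejects (ValueError).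
def Pre_digit_transpose (lines : List String) : Prop :=
  lines ≠ [] ∧ ∀ i ∈ List.range (pvMaxLen lines),
    (pvCol lines i).all (fun c => c = ' ') = true ∨
    (PySem.Int.ofStr? (String.mk (pvCol lines i))).isSome = true
instance (lines : List String) : Decidable (Pre_digit_transpose lines) := by
  unfold Pre_digit_transpose; infer_instance

def pvWitness_digit_transpose : List String := ["123", "456"]

def Spec_digit_transpose (lines : List String) (out : List Int) : Prop := out = digit_transpose_alt lines
instance (lines : List String) (out : List Int) : Decidable (Spec_digit_transpose lines out) := by unfold Spec_digit_transpose; infer_instance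

-- ===== CLAIM (what is proved, stated in full; the proofs are below) =====
def Claim_equal_digit_transpose : Prop := ∀ (lines : List String), Dom_digit_transpose lines → Pre_digit_transpose lines → Spec_digit_transpose lines (digit_transpose lines)

-- ===== LEMMAS AND PROOFS =====
theorem pvIsblank_eq (n : List Char) : pvIsblank n = !n.any (fun ch => ch ≠ ' ') := by
  induction n with
  | nil => simp [pvIsblank]
  | cons c t ih => by_cases h : c = ' ' <;> simp [pvIsblank, h, ih]

theorem pvAStep_eq (i : Nat) : pvAStep i = fun n line => n ++ pvCell line.toList i := by
  funext n line
  simp only [pvAStep, pvCell]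
  by_cases h : i < line.toList.length
  · have h0 : (0:Int) ≤ (line.toList.length : Int) - (i : Int) - 1 := by omega
    rw [if_pos h0]
    have hc : ((line.toList.length : Int) - (i : Int) - 1)
        = ((line.toList.length - 1 - i : Nat) : Int) := by omega
    rw [hc, PySem.List.pyGet?_natCast, List.getElem?_reverse h]
  · have h0 : ¬ (0:Int) ≤ (line.toList.length : Int) - (i : Int) - 1 := by omega
    rw [if_neg h0]
    have hr : line.toList.reverse[i]? = none := by
      rw [List.getElem?_eq_none_iff]; simpa using Nat.le_of_not_lt h
    rw [hr]; simp

theorem pvColA_eq (lines : List String) (i : Nat) :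
    lines.foldl (pvAStep i) [] = pvCol lines i := by
  rw [pvAStep_eq, PySem.List.foldl_append_eq_flatMap]
  simp [pvCol]

theorem pvBStep_getElem? (cols : List (List Char)) (line : String) (j : Nat) :
    (pvBStep cols line)[j]? = cols[j]?.map (fun c => c ++ pvCell line.toList j) := by
  unfold pvBStep pvCell
  simp only [List.getElem?_map, PySem.List.getElem?_enumerate]
  cases h : cols[j]? with
  | none => simp
  | some c =>
    simp only [Option.map_some]
    by_cases hj : j < line.toList.reverse.length
    · have h2 : ((0:Int) + (j : Int)).toNat = j := by omega
      simp [List.getD_eq_getElem?_getD, List.getElem?_eq_getElem hj]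
      simpa using hj
    · have hr : line.toList.reverse[j]? = none := by
        rw [List.getElem?_eq_none_iff]; simpa using Nat.le_of_not_lt hj
      simp [hr]
      simpa using Nat.le_of_not_lt hj

theorem pvBfold_getElem? (ls : List String) (cols : List (List Char)) (j : Nat) :
    (ls.foldl pvBStep cols)[j]?
      = cols[j]?.map (fun c => c ++ ls.flatMap (fun line => pvCell line.toList j)) := by
  induction ls generalizing cols with
  | nil => simp
  | cons l ls ih =>
    rw [List.foldl_cons, ih, pvBStep_getElem?]
    cases cols[j]? <;> simp

theorem pvCols_eq (lines : List String) :
    lines.foldl pvBStep (List.replicate (pvMaxLen lines) ([] : List Char))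
      = (List.range (pvMaxLen lines)).map (pvCol lines) := by
  apply List.ext_getElem?
  intro j
  rw [pvBfold_getElem?]
  by_cases hj : j < pvMaxLen lines <;> simp [hj, pvCol]

-- ===== VERDICT (by name: the statement is the Claim_ definition above) =====
theorem digit_transpose_spec : Claim_equal_digit_transpose := by
  intro lines _ _
  unfold Spec_digit_transpose
  simp only [digit_transpose, digit_transpose_alt]
  rw [pvCols_eq, List.foldl_map]
  have hstep : (fun (t : List Int) (i : Nat) =>
      let n := lines.foldl (pvAStep i) []
      if !pvIsblank n then t ++ [(PySem.Int.ofStr? (String.mk n)).getD 0] else t)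
    = fun (t : List Int) (i : Nat) =>
      if (pvCol lines i).any (fun ch => ch ≠ ' ') then
        t ++ [(PySem.Int.ofStr? (String.mk (pvCol lines i))).getD 0]
      else t := by
    funext t i
    simp only [pvColA_eq, pvIsblank_eq, Bool.not_not]
  rw [hstep]
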